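-- pv_equiv track=rewrite | github.com/COFExC0DE/QUINE | QUINE.py | contar_cantidad_unos
-- ===== SOURCE A (Python) =====
-- def numeros_en_orden(numeros):
--         num = ordenar_numeros(numeros)
--         i = 0
--         contador= []
--         while (i <= num):
--             contador += [i]
--             i += 1
--         return contador
--
-- def pren_apag(numeros):
--         numero = numeros_en_orden(numeros)
--         w = 0
--         res = []
--         for j in numero:
--                 res.append(0)
--         for e in numeros:
--                 for i in numero:
--                         if( e == i):
--                                 res[i] = 1
--         return res
--
-- def binario(n):
--     if n == 0:
--         return "0"
--     else:
--         return binaux(n, "")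
--
-- def binaux(n,res):
--     if n == 0:
--         return invertir(res)
--     else:
--         res+=str(n%2)
--         return binaux(n//2, res)
--
-- def invertir(string):
--     if len(string) == 1:
--         return string
--     else:
--         return invaux(string, "", len(string)-1)
--
-- def invaux(string, res, pos):
--     if pos < 0:
--         return res
--     else:
--         res += string[pos]
--         pos-=1
--         return invaux(string, res, pos)
--
-- def ordenar_numeros(lista):
--         i = 0
--         maximo = -1
--         while(i < len(lista)):
--             numero = lista[i]
--             if(maximo < numero ):
--                 maximo = numero
--             i += 1
--         return int(maximo)
--
-- def convertir(numeros):
--         res= pren_apag(numeros)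
--         i= 0
--         nr= []
--         while i < len(res):
--                 lis= numeros_en_orden(numeros)
--                 if res[i] == 1:
--                         n= lis[i]
--                         nr.append(binario(n))
--                 i+= 1
--         return nr
--
-- def contar_cantidad_unos(numeros):
--         num = convertir(numeros)
--         i = 0
--         lista = []
--         contador = 0
--         while i < len(num):
--                 binario = num[i]
--                 binar = str(binario)
--                 contador = 0
--                 j=0
--                 while j < len(binar):
--
--                         if binar[j] == '1':
--                                 contador += 1
--                         j+=1
--                 lista.append(contador)
--                 i+=1
--
--         return lista
-- ===== SOURCE B (Python) =====
-- def contar_cantidad_unos(numeros):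
--     presentes = sorted(set(x for x in numeros if x >= 0))
--     salida = []
--     for x in presentes:
--         c = 0
--         while x > 0:
--             c += x % 2
--             x //= 2
--         salida.append(c)
--     return salida
-- ===== Notes on version B (the rewrite author's own statement) =====
-- stated objective: faster
-- what changed: B sorts the distinct non-negative values and counts bits arithmetically, instead of A's build of a 0..max presence bitmap via nested scans plus per-index string conversion of each number to binary.
import Mathlib
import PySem

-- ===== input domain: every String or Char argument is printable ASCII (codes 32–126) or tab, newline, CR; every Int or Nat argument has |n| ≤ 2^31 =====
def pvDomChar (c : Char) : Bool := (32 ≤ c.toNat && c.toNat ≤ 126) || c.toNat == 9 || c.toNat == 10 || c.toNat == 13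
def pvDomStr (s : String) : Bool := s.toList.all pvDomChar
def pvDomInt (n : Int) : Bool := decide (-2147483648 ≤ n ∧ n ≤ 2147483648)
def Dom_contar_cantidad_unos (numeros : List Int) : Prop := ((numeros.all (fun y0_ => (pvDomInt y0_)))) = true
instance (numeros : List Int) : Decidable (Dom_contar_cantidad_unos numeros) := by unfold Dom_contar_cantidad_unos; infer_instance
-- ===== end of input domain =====

-- B replaces A's 0..max presence-bitmap build-and-scan (and its string-based bit
-- counting) by sorting the distinct non-negative values and counting bits arithmetically.

-- ===== PORT A =====
-- strings are ported as List Char (PySem convention: string facts live on the list side)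

-- while i < len(lista): maximo = lista[i] if maximo < lista[i]; the index loop is the fold over the list
def ordenar_numeros (lista : List Int) : Int :=
  lista.foldl (fun maximo numero => if maximo < numero then numero else maximo) (-1)

-- while (i <= num): contador += [i]; i += 1
def pvCountUp (i num : Int) : List Int :=
  if i ≤ num then i :: pvCountUp (i + 1) num else []
termination_by (num + 1 - i).toNat
decreasing_by omega

def numeros_en_orden (numeros : List Int) : List Int :=
  pvCountUp 0 (ordenar_numeros numeros)

def pren_apag (numeros : List Int) : List Int :=
  let numero := numeros_en_orden numeros
  let res := numero.map (fun _ => (0 : Int))   -- for j in numero: res.append(0)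
  numeros.foldl (fun res e =>
    numero.foldl (fun r i => if e = i then PySem.List.pySetD r i 1 else r) res) res
  -- res[i] = 1 : i ∈ numero is always a valid non-negative index, so pySetD is exact here

-- invaux: string[pos] is in range in every call Python makes; getD is exact there
def invaux (string : List Char) (res : List Char) (pos : Int) : List Char :=
  if pos < 0 then res
  else invaux string (res ++ [string.getD pos.toNat ' ']) (pos - 1)
termination_by (pos + 1).toNat
decreasing_by omega

def invertir (string : List Char) : List Char :=
  if string.length = 1 then string
  else invaux string [] ((string.length : Int) - 1)

-- binaux: Python recurses with n//2; it is only ever called with n ≥ 0, and the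
-- n < 0 branch (where Python would not terminate) is a totality guard only
def binaux (n : Int) (res : List Char) : List Char :=
  if n = 0 then invertir res
  else if n < 0 then res
  else binaux (PySem.Int.floordiv n 2) (res ++ (PySem.Int.toStr (PySem.Int.mod n 2)).toList)
termination_by n.toNat
decreasing_by
  have h2 : PySem.Int.floordiv n 2 = n / 2 := PySem.Int.floordiv_eq_ediv_of_pos (by omega)
  omega

def binario (n : Int) : List Char :=
  if n = 0 then ['0'] else binaux n []

-- while i < len(res): lis = numeros_en_orden(numeros); if res[i]==1: nr.append(binario(lis[i]))
-- lis has the same length as res, so lis[i] is in range; getD is exact there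
def convertir_aux (numeros : List Int) (res : List Int) (i : Nat) (nr : List (List Char)) :
    List (List Char) :=
  if h : i < res.length then
    let lis := numeros_en_orden numeros
    convertir_aux numeros res (i + 1)
      (if res[i] = 1 then nr ++ [binario (lis.getD i 0)] else nr)
  else nr
termination_by res.length - i

def convertir (numeros : List Int) : List (List Char) :=
  convertir_aux numeros (pren_apag numeros) 0 []

-- inner while j < len(binar): counting '1' characters
def pvCountOnes (binar : List Char) (j : Nat) (contador : Int) : Int :=
  if h : j < binar.length then
    pvCountOnes binar (j + 1) (if binar[j] = '1' then contador + 1 else contador)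
  else contador
termination_by binar.length - j

def contar_cantidad_unos (numeros : List Int) : List Int :=
  let num := convertir numeros
  num.foldl (fun lista binar => lista ++ [pvCountOnes binar 0 0]) []

-- ===== PORT B =====
-- while x > 0: c += x % 2; x //= 2
def pvPopcount (x : Int) : Int :=
  if 0 < x then PySem.Int.mod x 2 + pvPopcount (PySem.Int.floordiv x 2) else 0
termination_by x.toNat
decreasing_by
  have h2 : PySem.Int.floordiv x 2 = x / 2 := PySem.Int.floordiv_eq_ediv_of_pos (by omega)
  omega

def contar_cantidad_unos_alt (numeros : List Int) : List Int :=
  let presentes := PySem.List.sorted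
    (PySem.Set.ofList (numeros.filter (fun x => decide (0 ≤ x)))) (fun x => x) false
  presentes.foldl (fun salida x => salida ++ [pvPopcount x]) []

-- ===== PRECONDITION & SPEC =====
def Spec_contar_cantidad_unos (numeros : List Int) (out : List Int) : Prop := out = contar_cantidad_unos_alt numeros
instance (numeros : List Int) (out : List Int) : Decidable (Spec_contar_cantidad_unos numeros out) := by unfold Spec_contar_cantidad_unos; infer_instance

-- ===== CLAIM (what is proved, stated in full; the proofs are below) =====
def Claim_equal_contar_cantidad_unos : Prop := ∀ (numeros : List Int), Dom_contar_cantidad_unos numeros → Spec_contar_cantidad_unos numeros (contar_cantidad_unos numeros)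

-- ===== LEMMAS AND PROOFS =====

-- ordenar_numeros is foldl max (-1)
theorem ordenar_eq_foldl_max (lista : List Int) :
    ordenar_numeros lista = lista.foldl max (-1) := by
  unfold ordenar_numeros
  congr 1
  funext a b
  simp [max_def]
  split_ifs <;> omega

theorem le_ordenar (lista : List Int) (x : Int) (hx : x ∈ lista) :
    x ≤ ordenar_numeros lista := by
  rw [ordenar_eq_foldl_max]
  exact (PySem.List.le_foldl_max lista (-1)).2 x hx

-- pvCountUp facts
theorem pvCountUp_getElem? (k : Nat) : ∀ (i num : Int),
    (pvCountUp i num)[k]? = if i + k ≤ num then some (i + k) else none := by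
  induction k with
  | zero =>
    intro i num
    unfold pvCountUp
    split
    · rw [if_pos (by omega)]
      simp
    · rw [if_neg (by omega)]
      simp
  | succ k ih =>
    intro i num
    unfold pvCountUp
    split
    · rw [List.getElem?_cons_succ, ih]
      push_cast
      split_ifs with h1 h2
      · congr 1
        omega
      · exfalso; omega
      · exfalso; omega
      · rfl
    · rw [if_neg (by omega)]
      simp

theorem pvCountUp_length : ∀ (i num : Int),
    (pvCountUp i num).length = (num + 1 - i).toNat := by
  intro i num
  induction hd : (num + 1 - i).toNat generalizing i with
  | zero =>
    unfold pvCountUp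
    rw [if_neg (by omega)]
    simp
  | succ d ih =>
    unfold pvCountUp
    rw [if_pos (by omega)]
    simp [ih (i + 1) (by omega)]

theorem pvCountUp_mem (x : Int) : ∀ (i num : Int),
    x ∈ pvCountUp i num ↔ i ≤ x ∧ x ≤ num := by
  intro i num
  induction hd : (num + 1 - i).toNat generalizing i with
  | zero =>
    unfold pvCountUp
    rw [if_neg (by omega)]
    simp
    omega
  | succ d ih =>
    unfold pvCountUp
    rw [if_pos (by omega)]
    simp [ih (i + 1) (by omega)]
    omega

-- the presence bitmap: the inner loop sets position e (when e is a valid value)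
theorem pren_inner (numero : List Int) (hne : ∀ i ∈ numero, (0:Int) ≤ i) (e : Int) :
    ∀ r : List Int,
      numero.foldl (fun r i => if e = i then PySem.List.pySetD r i 1 else r) r
        = if e ∈ numero then r.set e.toNat 1 else r := by
  induction numero with
  | nil => intro r; simp
  | cons i t ih =>
    intro r
    have hne' : ∀ j ∈ t, (0:Int) ≤ j := fun j hj => hne j (List.mem_cons_of_mem i hj)
    simp only [List.foldl_cons]
    by_cases he : e = i
    · subst he
      rw [if_pos rfl, PySem.List.pySetD_of_nonneg _ _ (hne e (List.mem_cons_self ..)),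
        ih hne']
      by_cases het : e ∈ t
      · simp [het, List.set_set]
      · simp [het]
    · rw [if_neg he, ih hne']
      simp [List.mem_cons, he]

-- the outer loop over numeros marks exactly the present values
theorem pren_outer (numero : List Int) (hne : ∀ i ∈ numero, (0:Int) ≤ i) :
    ∀ (numeros r0 : List Int) (k : Nat),
      (∀ i ∈ numero, i.toNat < r0.length) →
      (numeros.foldl (fun res e =>
          numero.foldl (fun r i => if e = i then PySem.List.pySetD r i 1 else r) res) r0)[k]?
        = if ((k:Int) ∈ numeros ∧ (k:Int) ∈ numero) then some 1 else r0[k]? := by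
  intro numeros
  induction numeros with
  | nil => intro r0 k _; simp
  | cons e rest ih =>
    intro r0 k hlen
    simp only [List.foldl_cons]
    rw [pren_inner numero hne e r0]
    by_cases hem : e ∈ numero
    · rw [if_pos hem]
      have hlen' : ∀ i ∈ numero, i.toNat < (r0.set e.toNat 1).length := by
        simpa using hlen
      rw [ih (r0.set e.toNat 1) k hlen']
      by_cases hkr : ((k:Int) ∈ rest ∧ (k:Int) ∈ numero)
      · rw [if_pos hkr, if_pos ⟨List.mem_cons_of_mem e hkr.1, hkr.2⟩]
      · rw [if_neg hkr]
        by_cases hke : (k:Int) = e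
        · have htn : e.toNat = k := by
            have := hne e hem
            omega
          rw [htn, List.getElem?_set_self (htn ▸ hlen e hem)]
          rw [if_pos ⟨List.mem_cons.mpr (Or.inl hke), hke ▸ hem⟩]
        · have htn : e.toNat ≠ k := by
            have := hne e hem
            omega
          rw [List.getElem?_set_ne htn, if_neg]
          rintro ⟨hmem, hkn⟩
          rcases List.mem_cons.mp hmem with h | h
          · exact hke h
          · exact hkr ⟨h, hkn⟩
    · rw [if_neg hem, ih r0 k hlen]
      by_cases hkr : ((k:Int) ∈ rest ∧ (k:Int) ∈ numero)
      · rw [if_pos hkr, if_pos ⟨List.mem_cons_of_mem e hkr.1, hkr.2⟩]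
      · rw [if_neg hkr, if_neg]
        rintro ⟨hmem, hkn⟩
        rcases List.mem_cons.mp hmem with h | h
        · exact hem (h ▸ hkn)
        · exact hkr ⟨h, hkn⟩

-- the bitmap holds 1 exactly at the indices that occur in numeros
theorem pren_apag_getElem? (numeros : List Int) (k : Nat) :
    (pren_apag numeros)[k]?
      = if k < (ordenar_numeros numeros + 1).toNat
          then some (if (k:Int) ∈ numeros then 1 else 0) else none := by
  unfold pren_apag numeros_en_orden
  set M := ordenar_numeros numeros with hM
  set numero := pvCountUp 0 M with hnum
  have hmem : ∀ x : Int, x ∈ numero ↔ 0 ≤ x ∧ x ≤ M := fun x => pvCountUp_mem x 0 M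
  have hne : ∀ i ∈ numero, (0:Int) ≤ i := fun i hi => ((hmem i).mp hi).1
  have hnumlen : numero.length = (M + 1).toNat := by
    rw [hnum, pvCountUp_length]
    omega
  have hlen : ∀ i ∈ numero, i.toNat < (numero.map (fun _ => (0:Int))).length := by
    intro i hi
    have := (hmem i).mp hi
    rw [List.length_map, hnumlen]
    omega
  rw [pren_outer numero hne numeros _ k hlen]
  by_cases hk : k < (M + 1).toNat
  · have hkn : (k:Int) ∈ numero := (hmem _).mpr ⟨by omega, by omega⟩
    by_cases hin : (k:Int) ∈ numeros
    · rw [if_pos ⟨hin, hkn⟩, if_pos hk, if_pos hin]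
    · rw [if_neg (by tauto), if_pos hk, if_neg hin, List.getElem?_map,
        List.getElem?_eq_getElem (by omega : k < numero.length)]
      rfl
  · have hkn : (k:Int) ∉ numero := by
      rw [hmem]
      omega
    rw [if_neg (by tauto), if_neg hk, List.getElem?_map,
      List.getElem?_eq_none (by omega : numero.length ≤ k)]
    rfl

theorem pren_apag_length (numeros : List Int) :
    (pren_apag numeros).length = (ordenar_numeros numeros + 1).toNat := by
  unfold pren_apag numeros_en_orden
  set numero := pvCountUp 0 (ordenar_numeros numeros) with hnum
  have hinlen : ∀ (e : Int) (r : List Int),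
      (numero.foldl (fun r i => if e = i then PySem.List.pySetD r i 1 else r) r).length
        = r.length := by
    intro e
    induction numero with
    | nil => intro r; simp
    | cons i t ih =>
      intro r
      simp only [List.foldl_cons]
      split
      · rw [ih, PySem.List.length_pySetD]
      · rw [ih]
  have houtlen : ∀ (l r0 : List Int),
      (l.foldl (fun res e =>
        numero.foldl (fun r i => if e = i then PySem.List.pySetD r i 1 else r) res) r0).length
        = r0.length := by
    intro l
    induction l with
    | nil => intro r0; rfl
    | cons e rest ih => intro r0; simp only [List.foldl_cons]; rw [ih, hinlen]
  rw [houtlen, List.length_map, hnum, pvCountUp_length]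
  omega

-- the present values 0..max that occur in numeros, ascending (proof-side description)
def presentVals (numeros : List Int) : List Int :=
  (List.range (ordenar_numeros numeros + 1).toNat).filterMap
    (fun (k : Nat) => if (k:Int) ∈ numeros then some ((k:Int)) else none)

theorem convertir_eq (numeros : List Int) :
    convertir numeros = (presentVals numeros).map binario := by
  unfold convertir presentVals
  set M := ordenar_numeros numeros with hM
  set res := pren_apag numeros with hres
  have hlen : res.length = (M + 1).toNat := pren_apag_length numeros
  rw [List.map_filterMap]
  have key : ∀ (d i : Nat) (nr : List (List Char)), res.length - i ≤ d →
      convertir_aux numeros res i nr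
        = nr ++ ((List.range (M + 1).toNat).drop i).filterMap
            (fun (k : Nat) =>
              Option.map binario (if (k:Int) ∈ numeros then some ((k:Int)) else none)) := by
    intro d
    induction d with
    | zero =>
      intro i nr hd
      unfold convertir_aux
      rw [dif_neg (by omega),
        List.drop_eq_nil_of_le (by rw [List.length_range]; omega),
        List.filterMap_nil, List.append_nil]
    | succ d ih =>
      intro i nr hd
      by_cases hi : i < res.length
      · unfold convertir_aux
        rw [dif_pos hi]
        have hiL : i < (M + 1).toNat := by omega
        have hresi : res[i] = if (i:Int) ∈ numeros then 1 else 0 := by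
          have h := pren_apag_getElem? numeros i
          rw [← hres, List.getElem?_eq_getElem hi, ← hM, if_pos hiL] at h
          exact Option.some.inj h
        have hlis : (numeros_en_orden numeros).getD i 0 = (i:Int) := by
          unfold numeros_en_orden
          have hil : i < (pvCountUp 0 (ordenar_numeros numeros)).length := by
            rw [pvCountUp_length]
            omega
          have hg := pvCountUp_getElem? i 0 (ordenar_numeros numeros)
          rw [if_pos (by omega), List.getElem?_eq_getElem hil] at hg
          rw [List.getD_eq_getElem _ _ hil]
          have := Option.some.inj hg
          omega
        rw [ih (i + 1) _ (by omega)]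
        conv_rhs => rw [List.drop_eq_getElem_cons
            (show i < (List.range (M + 1).toNat).length by rw [List.length_range]; exact hiL),
          List.getElem_range, List.filterMap_cons]
        rw [hresi, hlis]
        by_cases hin : (i:Int) ∈ numeros
        · simp [hin, List.append_assoc]
        · simp [hin]
      · unfold convertir_aux
        rw [dif_neg hi,
          List.drop_eq_nil_of_le (by rw [List.length_range]; omega),
          List.filterMap_nil, List.append_nil]
  rw [key res.length 0 [] (by omega), List.drop_zero, List.nil_append]

-- the character-counting loop counts '1' characters
theorem pvCountOnes_spec (s : List Char) :
    ∀ (d j : Nat) (c : Int), s.length - j ≤ d →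
      pvCountOnes s j c = c + ((s.drop j).count '1' : Nat) := by
  intro d
  induction d with
  | zero =>
    intro j c hd
    unfold pvCountOnes
    rw [dif_neg (by omega), List.drop_eq_nil_of_le (by omega)]
    simp
  | succ d ih =>
    intro j c hd
    by_cases hj : j < s.length
    · unfold pvCountOnes
      rw [dif_pos hj, ih (j + 1) _ (by omega),
        List.drop_eq_getElem_cons hj, List.count_cons]
      split <;> rename_i h
      · simp [h]
        ring
      · simp [h]
    · unfold pvCountOnes
      rw [dif_neg hj, List.drop_eq_nil_of_le (by omega)]
      simp

-- invaux appends the reversed prefix; invertir is reverse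
theorem invaux_eq (s : List Char) :
    ∀ (d : Nat) (pos : Int) (res : List Char), (pos + 1).toNat ≤ d → pos < (s.length : Int) →
      invaux s res pos = res ++ (s.take (pos + 1).toNat).reverse := by
  intro d
  induction d with
  | zero =>
    intro pos res hd hpos
    unfold invaux
    rw [if_pos (by omega)]
    have h0 : (pos + 1).toNat = 0 := by omega
    simp [h0]
  | succ d ih =>
    intro pos res hd hpos
    by_cases hneg : pos < 0
    · unfold invaux
      rw [if_pos hneg]
      have h0 : (pos + 1).toNat = 0 := by omega
      simp [h0]
    · unfold invaux
      rw [if_neg hneg]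
      have hlt : pos.toNat < s.length := by omega
      rw [ih (pos - 1) _ (by omega) (by omega), List.getD_eq_getElem _ _ hlt]
      have h1 : (pos - 1 + 1).toNat = pos.toNat := by omega
      have h2 : (pos + 1).toNat = pos.toNat + 1 := by omega
      rw [h1, h2, List.take_add_one, List.getElem?_eq_getElem hlt, List.reverse_append]
      simp [List.append_assoc]

theorem invertir_eq_reverse (s : List Char) : invertir s = s.reverse := by
  unfold invertir
  by_cases h1 : s.length = 1
  · rw [if_pos h1]
    rcases List.length_eq_one_iff.mp h1 with ⟨a, rfl⟩
    rfl
  · rw [if_neg h1,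
      invaux_eq s ((s.length : Int) - 1 + 1).toNat ((s.length : Int) - 1) [] le_rfl (by omega)]
    have h2 : ((s.length : Int) - 1 + 1).toNat = s.length := by omega
    rw [h2]
    simp

-- counting '1' in A's binary string equals B's arithmetic popcount
theorem binaux_count :
    ∀ (d : Nat) (n : Int) (res : List Char), 0 ≤ n → n.toNat ≤ d →
      (((binaux n res).count '1' : Nat) : Int) = pvPopcount n + ((res.count '1' : Nat) : Int) := by
  intro d
  induction d with
  | zero =>
    intro n res hn hd
    have h0 : n = 0 := by omega
    subst h0
    unfold binaux pvPopcount
    rw [if_pos rfl, if_neg (by omega), invertir_eq_reverse, List.count_reverse]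
    ring
  | succ d ih =>
    intro n res hn hd
    by_cases h0 : n = 0
    · subst h0
      unfold binaux pvPopcount
      rw [if_pos rfl, if_neg (by omega), invertir_eq_reverse, List.count_reverse]
      ring
    · have hpos : 0 < n := by omega
      have hdiv : PySem.Int.floordiv n 2 = n / 2 := PySem.Int.floordiv_eq_ediv_of_pos (by omega)
      unfold binaux
      rw [if_neg h0, if_neg (by omega)]
      rw [ih (PySem.Int.floordiv n 2) _ (by omega) (by omega)]
      have hpc : pvPopcount n = PySem.Int.mod n 2 + pvPopcount (PySem.Int.floordiv n 2) := by
        conv_lhs => unfold pvPopcount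
        rw [if_pos hpos]
      rw [hpc, List.count_append]
      have hm0 := PySem.Int.mod_nonneg n (b := 2) (by omega)
      have hm2 := PySem.Int.mod_lt n (b := 2) (by omega)
      have : PySem.Int.mod n 2 = 0 ∨ PySem.Int.mod n 2 = 1 := by omega
      rcases this with h | h <;> rw [h]
      · have hs : (PySem.Int.toStr (0:Int)).toList = ['0'] := by decide
        rw [hs]
        have hc : List.count '1' ['0'] = 0 := by decide
        rw [hc]
        push_cast
        ring
      · have hs : (PySem.Int.toStr (1:Int)).toList = ['1'] := by decide
        rw [hs]
        have hc : List.count '1' ['1'] = 1 := by decide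
        rw [hc]
        push_cast
        ring

theorem count_binario (n : Int) (hn : 0 ≤ n) :
    (((binario n).count '1' : Nat) : Int) = pvPopcount n := by
  unfold binario
  by_cases h0 : n = 0
  · subst h0
    unfold pvPopcount
    simp
  · rw [if_neg h0]
    have := binaux_count n.toNat n [] hn le_rfl
    simpa using this

-- B unfolded to a map over the sorted distinct non-negative values
theorem alt_eq_map (numeros : List Int) :
    contar_cantidad_unos_alt numeros
      = (PySem.List.sorted (PySem.Set.ofList (numeros.filter (fun x => decide (0 ≤ x))))
          (fun x => x) false).map pvPopcount := by
  unfold contar_cantidad_unos_alt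
  rw [PySem.List.foldl_append_singleton_eq_map]
  simp

theorem presentVals_mem (numeros : List Int) (x : Int) :
    x ∈ presentVals numeros ↔ (0 ≤ x ∧ x ∈ numeros) := by
  unfold presentVals
  rw [List.mem_filterMap]
  constructor
  · rintro ⟨k, _, hfk⟩
    split at hfk
    · rename_i hin
      cases hfk
      exact ⟨by omega, hin⟩
    · cases hfk
  · rintro ⟨hx0, hxm⟩
    refine ⟨x.toNat, ?_, ?_⟩
    · rw [List.mem_range]
      have := le_ordenar numeros x hxm
      omega
    · have hc : ((x.toNat : Int)) = x := by omega
      rw [hc, if_pos hxm]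

theorem presentVals_pairwise (numeros : List Int) :
    (presentVals numeros).Pairwise (· < ·) := by
  unfold presentVals
  apply List.Pairwise.filterMap _ _ List.pairwise_lt_range
  intro a a' haa b hb b' hb'
  split at hb <;> cases hb
  split at hb' <;> cases hb'
  exact_mod_cast haa

-- the sorted distinct non-negative values are exactly presentVals
theorem sorted_eq_presentVals (numeros : List Int) :
    PySem.List.sorted (PySem.Set.ofList (numeros.filter (fun x => decide (0 ≤ x))))
        (fun x => x) false = presentVals numeros := by
  apply PySem.List.sorted_eq_of_perm_of_pairwise_lt
  · have hnodupP : (presentVals numeros).Nodup :=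
      (presentVals_pairwise numeros).imp ne_of_lt
    have hnodupS := PySem.Set.nodup_ofList (numeros.filter (fun x => decide (0 ≤ x)))
    rw [List.perm_ext_iff_of_nodup hnodupP hnodupS]
    intro a
    rw [presentVals_mem, PySem.Set.mem_ofList, List.mem_filter]
    simp [and_comm]
  · exact presentVals_pairwise numeros

-- ===== VERDICT (by name: the statement is the Claim_ definition above) =====
theorem contar_cantidad_unos_spec : Claim_equal_contar_cantidad_unos := by
  intro numeros _
  unfold Spec_contar_cantidad_unos
  unfold contar_cantidad_unos
  rw [convertir_eq, PySem.List.foldl_append_singleton_eq_map, List.nil_append,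
    alt_eq_map, sorted_eq_presentVals, List.map_map]
  apply List.map_congr_left
  intro x hx
  have hx0 : 0 ≤ x := ((presentVals_mem numeros x).mp hx).1
  simp only [Function.comp]
  rw [pvCountOnes_spec (binario x) (binario x).length 0 0 (by omega), List.drop_zero]
  simpa using count_binario x hx0
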